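-- pv_equiv track=rewrite | github.com/Cheol-H-Jeong/eodinga | eodinga/content/code.py | _leading_comment_block
-- ===== SOURCE A (Python) =====
-- COMMENT_PREFIXES = ("#", "//", "/*", "*", "--", ";", "%", "'")
--
-- def _leading_comment_block(source: str) -> str:
--     comments: list[str] = []
--     for line in source.splitlines():
--         stripped = line.strip()
--         if not stripped and not comments:
--             continue
--         if stripped.startswith(COMMENT_PREFIXES):
--             comment = stripped.lstrip("#/*-;%' ").rstrip("*/ ").strip()
--             if comment:
--                 comments.append(comment)
--             continue
--         break
--     return "\n".join(comments)
-- ===== SOURCE B (Python) =====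
-- # Recursive two-phase design: a tri-state line classifier, a prologue-skipping
-- # recursion, and a block-collecting recursion that builds the result string
-- # directly with an accumulator (no comments list, no join).
-- COMMENT_PREFIXES = ("#", "//", "/*", "*", "--", ";", "%", "'")
--
--
-- def _text_of(line):
--     """None for a blank line, False for a code line, else the cleaned comment text."""
--     stripped = line.strip()
--     if not stripped:
--         return None
--     if not stripped.startswith(COMMENT_PREFIXES):
--         return False
--     return stripped.lstrip("#/*-;%' ").rstrip("*/ ").strip()
--
--
-- def _take(lines, acc):
--     """Phase 2: extend the block, appending each non-empty cleaned comment text."""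
--     if not lines:
--         return acc
--     text = _text_of(lines[0])
--     if text is None or text is False:
--         return acc
--     if text == "":
--         return _take(lines[1:], acc)
--     return _take(lines[1:], acc + "\n" + text)
--
--
-- def _skip(lines):
--     """Phase 1: recurse past blank lines and comments carrying no text."""
--     if not lines:
--         return ""
--     text = _text_of(lines[0])
--     if text is None or text == "":
--         return _skip(lines[1:])
--     if text is False:
--         return ""
--     return _take(lines[1:], text)
--
--
-- def _leading_comment_block(source: str) -> str:
--     return _skip(source.splitlines())
-- ===== Notes on version B (the rewrite author's own statement) =====
-- stated objective: alternative
-- what changed: Replaces A's single loop that maintains a comments list and joins it at the end by a recursive two-phase design: a tri-state per-line classifier (blank/code/comment-text), a prologue-skipping recursion and a block-collecting recursion that concatenates the result string directly through an accumulator, so no list and no join exist in B.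
import Mathlib
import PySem

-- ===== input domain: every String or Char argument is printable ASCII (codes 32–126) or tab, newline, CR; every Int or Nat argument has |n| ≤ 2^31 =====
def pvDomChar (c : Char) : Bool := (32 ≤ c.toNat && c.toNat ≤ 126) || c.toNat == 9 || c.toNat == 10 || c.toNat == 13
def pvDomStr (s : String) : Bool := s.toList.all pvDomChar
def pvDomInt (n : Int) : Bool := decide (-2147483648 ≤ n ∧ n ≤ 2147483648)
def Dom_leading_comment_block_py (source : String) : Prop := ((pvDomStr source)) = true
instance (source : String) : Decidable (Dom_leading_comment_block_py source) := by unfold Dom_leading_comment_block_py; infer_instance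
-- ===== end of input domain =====

-- B replaces A's loop (comments list + final join) by a recursive two-phase design with a
-- tri-state line classifier and a string accumulator (alternative decomposition, same cost).
-- Shared constant:
def pvPrefixes : List String := ["#", "//", "/*", "*", "--", ";", "%", "'"]
-- hand port of str.lstrip(chars) / str.rstrip(chars) (char-set strip; PySem has only the both-sided stripChars): exact
def pvLstripChars (s chars : String) : String := String.ofList (s.toList.dropWhile (chars.toList.contains ·))
def pvRstripChars (s chars : String) : String := String.ofList ((s.toList.reverse.dropWhile (chars.toList.contains ·)).reverse)

-- ===== PORT A =====
-- stripped.startswith(COMMENT_PREFIXES)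
def pvIsComment (line : String) : Bool := pvPrefixes.any (PySem.Str.startswith (PySem.Str.strip line))
-- line.strip().lstrip("#/*-;%' ").rstrip("*/ ").strip()
def pvClean (line : String) : String :=
  PySem.Str.strip (pvRstripChars (pvLstripChars (PySem.Str.strip line) "#/*-;%' ") "*/ ")
-- the for-loop with continue/break, state = collected comments
def pvLoopA : List String → List String → List String
  | [], comments => comments
  | line :: rest, comments =>
    let stripped := PySem.Str.strip line
    if stripped == "" && comments.isEmpty then pvLoopA rest comments
    else if pvIsComment line then
      let comment := pvClean line
      if comment == "" then pvLoopA rest comments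
      else pvLoopA rest (comments ++ [comment])
    else comments

def leading_comment_block_py (source : String) : String :=
  PySem.Str.join "\n" (pvLoopA (PySem.Str.splitlines source) [])

-- ===== PORT B =====
-- _text_of's tri-state return value (None / False / cleaned text) as an inductive
inductive PvLineKind
  | blank
  | code
  | text : String → PvLineKind
deriving DecidableEq, Repr

def pvTextOf (line : String) : PvLineKind :=
  let stripped := PySem.Str.strip line
  if stripped == "" then .blank
  else if !(pvPrefixes.any (PySem.Str.startswith stripped)) then .code
  else .text (PySem.Str.strip (pvRstripChars (pvLstripChars stripped "#/*-;%' ") "*/ "))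

def pvTake : List String → String → String
  | [], acc => acc
  | line :: rest, acc =>
    match pvTextOf line with
    | .blank => acc
    | .code => acc
    | .text t => if t == "" then pvTake rest acc else pvTake rest (acc ++ "\n" ++ t)

def pvSkip : List String → String
  | [] => ""
  | line :: rest =>
    match pvTextOf line with
    | .blank => pvSkip rest
    | .code => ""
    | .text t => if t == "" then pvSkip rest else pvTake rest t

def leading_comment_block_py_alt (source : String) : String :=
  pvSkip (PySem.Str.splitlines source)

-- ===== PRECONDITION & SPEC =====
def Spec_leading_comment_block_py (source : String) (out : String) : Prop := out = leading_comment_block_py_alt source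
instance (source : String) (out : String) : Decidable (Spec_leading_comment_block_py source out) := by unfold Spec_leading_comment_block_py; infer_instance

-- ===== CLAIM (what is proved, stated in full; the proofs are below) =====
def Claim_equal_leading_comment_block_py : Prop := ∀ (source : String), Dom_leading_comment_block_py source → Spec_leading_comment_block_py source (leading_comment_block_py source)

-- ===== LEMMAS AND PROOFS =====

-- the classifier vs A's tests
theorem pvTextOf_blank (line : String) (h : (PySem.Str.strip line == "") = true) :
    pvTextOf line = .blank := by
  simp only [pvTextOf]; rw [if_pos h]

theorem pvTextOf_code (line : String) (h1 : (PySem.Str.strip line == "") = false)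
    (h2 : pvIsComment line = false) : pvTextOf line = .code := by
  simp only [pvTextOf, pvIsComment] at *
  rw [if_neg (by simp_all), if_pos (by simp_all)]

theorem pvTextOf_text (line : String) (h2 : pvIsComment line = true) :
    pvTextOf line = .text (pvClean line) := by
  have h1 : (PySem.Str.strip line == "") = false := by
    cases hb : (PySem.Str.strip line == "") with
    | true =>
      exfalso
      simp only [pvIsComment] at h2
      rw [beq_iff_eq] at hb
      rw [hb] at h2
      simp [pvPrefixes, PySem.Str.startswith, PySem.Chars.startswith] at h2
    | false => rfl
  simp only [pvTextOf, pvIsComment, pvClean] at *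
  rw [if_neg (by simp_all), if_neg (by simp_all)]

-- joining-with-newline facts, through toList
theorem pvJoin_singleton (a : String) : PySem.Str.join "\n" [a] = a := by
  unfold PySem.Str.join
  simp [PySem.Chars.join_singleton]

theorem pvJoin_cons_cons (a b : String) (L : List String) :
    PySem.Str.join "\n" (a :: b :: L) = PySem.Str.join "\n" ((a ++ "\n" ++ b) :: L) := by
  unfold PySem.Str.join
  congr 1
  cases L with
  | nil => simp [PySem.Chars.join_singleton, PySem.Chars.join_cons_cons]
  | cons c cs => simp [PySem.Chars.join_cons_cons]

-- phase 2 computes acc joined with the cleaned, filtered comment run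
theorem pvTake_eq (lines : List String) (acc : String) :
    pvTake lines acc
      = PySem.Str.join "\n" (acc :: ((lines.takeWhile pvIsComment).map pvClean).filter (· != "")) := by
  induction lines generalizing acc with
  | nil => simp [pvTake, pvJoin_singleton]
  | cons line rest ih =>
    by_cases hp : pvIsComment line = true
    · rw [show pvTake (line :: rest) acc
          = (if pvClean line == "" then pvTake rest acc
             else pvTake rest (acc ++ "\n" ++ pvClean line)) from by
        simp only [pvTake, pvTextOf_text line hp]]
      by_cases hc : pvClean line = ""
      · rw [if_pos (by simp [hc]), ih]
        simp [hp, hc]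
      · rw [if_neg (by simp [hc]), ih]
        simp only [hp, if_pos, List.takeWhile, List.map_cons, List.filter_cons,
          show ((pvClean line != "") = true) from by simp [hc]]
        rw [pvJoin_cons_cons]
    · have hstop : List.takeWhile pvIsComment (line :: rest) = [] := by
        simp [hp]
      rw [hstop]
      have hT : pvTake (line :: rest) acc = acc := by
        rcases hk : pvTextOf line with _ | _ | t
        · simp only [pvTake, hk]
        · simp only [pvTake, hk]
        · exfalso
          apply hp
          simp only [pvTextOf] at hk
          by_cases h1 : (PySem.Str.strip line == "") = true
          · rw [if_pos h1] at hk; cases hk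
          · rw [if_neg h1] at hk
            by_cases h2 : pvPrefixes.any (PySem.Str.startswith (PySem.Str.strip line)) = true
            · simpa [pvIsComment] using h2
            · rw [if_pos (by simp [h2])] at hk; cases hk
      rw [hT]
      simp [pvJoin_singleton]

-- once a comment was collected, A's loop appends the cleaned, filtered comment run
theorem pvLoopA_of_ne_nil (lines : List String) (comments : List String)
    (h : comments ≠ []) :
    pvLoopA lines comments
      = comments ++ ((lines.takeWhile pvIsComment).map pvClean).filter (· != "") := by
  induction lines generalizing comments with
  | nil => simp [pvLoopA]
  | cons line rest ih =>
    simp only [pvLoopA]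
    rw [if_neg (by simp [List.isEmpty_iff, h])]
    by_cases hp : pvIsComment line
    · rw [if_pos hp]
      by_cases hc : pvClean line = ""
      · rw [if_pos (by simp [hc])]
        rw [ih comments h]
        simp [hp, hc]
      · rw [if_neg (by simp [hc])]
        rw [ih _ (by simp)]
        simp [hp, hc]
    · rw [if_neg (by simpa using hp)]
      simp [hp]

-- main: A's joined loop result is B's two-phase recursion
theorem pvLoopA_join_eq_pvSkip (lines : List String) :
    PySem.Str.join "\n" (pvLoopA lines []) = pvSkip lines := by
  induction lines with
  | nil => simp [pvLoopA, pvSkip, PySem.Str.join, PySem.Chars.join, List.intercalate]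
  | cons line rest ih =>
    by_cases hb : (PySem.Str.strip line == "") = true
    · -- blank line: both recurse
      have hA : pvLoopA (line :: rest) [] = pvLoopA rest [] := by
        simp only [pvLoopA]
        rw [if_pos (by simp [hb])]
      rw [hA, ih, show pvSkip (line :: rest) = pvSkip rest from by
        simp [pvSkip, pvTextOf_blank line hb]]
    · by_cases hp : pvIsComment line = true
      · have hA : pvLoopA (line :: rest) []
            = (if pvClean line == "" then pvLoopA rest []
               else pvLoopA rest [pvClean line]) := by
          simp only [pvLoopA]
          rw [if_neg (by simp [hb]), if_pos hp]
          simp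
        have hB : pvSkip (line :: rest)
            = (if pvClean line == "" then pvSkip rest else pvTake rest (pvClean line)) := by
          simp only [pvSkip, pvTextOf_text line hp]
        by_cases hc : pvClean line = ""
        · rw [hA, if_pos (by simp [hc]), hB, if_pos (by simp [hc]), ih]
        · rw [hA, if_neg (by simp [hc]), hB, if_neg (by simp [hc])]
          rw [pvLoopA_of_ne_nil _ _ (by simp), pvTake_eq]
          simp
      · -- code line: both stop empty
        have hA : pvLoopA (line :: rest) [] = [] := by
          simp only [pvLoopA]
          rw [if_neg (by simp [hb]), if_neg (by simpa using hp)]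
        rw [hA, show pvSkip (line :: rest) = "" from by
          simp [pvSkip, pvTextOf_code line (by simpa using hb) (by simpa using hp)]]
        simp [PySem.Str.join, PySem.Chars.join, List.intercalate]

-- ===== VERDICT (by name: the statement is the Claim_ definition above) =====
theorem leading_comment_block_py_spec : Claim_equal_leading_comment_block_py := by
  intro source _
  unfold Spec_leading_comment_block_py leading_comment_block_py leading_comment_block_py_alt
  exact pvLoopA_join_eq_pvSkip _
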